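-- pv_equiv track=rewrite | github.com/c3lab-net/cidt-public-clouds | analysis/route_filters.py | calculate_appearance_times
-- ===== SOURCE A (Python) =====
-- def calculate_appearance_times(input_dict: dict[str, list[str]]) -> dict[str, dict[str, int]]:
--     appearance_dict = {}
--     for key, values in input_dict.items():
--         # Using a defaultdict to automatically initialize counts to 0
--         counts = {}
--         for value in values:
--             counts[value] = counts.get(value, 0) + 1
--         appearance_dict[key] = counts
--     return appearance_dict
-- ===== SOURCE B (Python) =====
-- def calculate_appearance_times(input_dict: dict[str, list[str]]) -> dict[str, dict[str, int]]:
--     def tally(values: list[str]) -> dict[str, int]: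
--         if not values:
--             return {}
--         head, tail = values[0], values[1:]
--         result = {head: 1 + sum(1 for x in tail if x == head)}
--         result.update(tally([x for x in tail if x != head]))
--         return result
--     return {key: tally(values) for key, values in input_dict.items()}
-- ===== Notes on version B (the rewrite author's own statement) =====
-- stated objective: alternative
-- what changed: Replaces A's imperative hash-count loop (mutating a running counts dict per element) by a recursive partition-and-count: take the first value, count its occurrences directly, recurse on the tail with that value filtered out; the outer dict is a plain comprehension instead of A's insert loop.
import Mathlib
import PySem

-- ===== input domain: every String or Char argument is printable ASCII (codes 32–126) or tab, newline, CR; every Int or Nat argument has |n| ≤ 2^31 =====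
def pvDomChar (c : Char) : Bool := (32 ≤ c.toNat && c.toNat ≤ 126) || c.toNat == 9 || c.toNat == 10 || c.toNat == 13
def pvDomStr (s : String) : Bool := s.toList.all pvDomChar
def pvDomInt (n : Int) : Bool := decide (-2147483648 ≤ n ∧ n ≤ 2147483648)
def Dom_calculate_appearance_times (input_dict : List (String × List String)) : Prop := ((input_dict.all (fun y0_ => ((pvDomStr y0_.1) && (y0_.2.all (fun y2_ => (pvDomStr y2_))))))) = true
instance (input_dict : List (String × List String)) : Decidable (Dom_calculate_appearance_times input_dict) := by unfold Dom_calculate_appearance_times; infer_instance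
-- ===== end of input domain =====

-- B replaces A's running hash-count loop by a recursive partition-and-count (count the head, recurse on the tail with the head filtered out); same values.

-- ===== PORT A =====
def calculate_appearance_times (input_dict : List (String × List String)) : List (String × List (String × Int)) :=
  (input_dict.foldl
    (fun appearance_dict kv =>
      appearance_dict.insert kv.1
        ((kv.2.foldl (fun counts value => counts.insert value (counts.getD value 0 + 1))
            (PySem.Dict.empty : PySem.Dict String Int)).items))
    (PySem.Dict.empty : PySem.Dict String (List (String × Int)))).items

-- ===== PORT B =====
-- Source B's recursive tally: head gets 1 + (occurrences in the tail); recurse on the tail without the head.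
def pvTally : List String → List (String × Int)
  | [] => []
  | head :: tail =>
    (head, 1 + ((tail.countP (fun x => x == head) : Nat) : Int)) ::
      pvTally (tail.filter (fun x => x ≠ head))
termination_by values => values.length
decreasing_by
  simp only [List.length_unattach]
  exact Nat.lt_succ_of_le (le_trans (List.length_filter_le _ _) (by simp))

def calculate_appearance_times_alt (input_dict : List (String × List String)) : List (String × List (String × Int)) :=
  input_dict.map (fun kv => (kv.1, pvTally kv.2))

-- ===== PRECONDITION & SPEC =====
-- Pre_ excludes association lists with duplicate keys: the Python argument is a dict, whose
-- keys are necessarily distinct, so no actual Python input of A is excluded.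
def Pre_calculate_appearance_times (input_dict : List (String × List String)) : Prop :=
  (input_dict.map Prod.fst).Nodup
instance (input_dict : List (String × List String)) : Decidable (Pre_calculate_appearance_times input_dict) := by unfold Pre_calculate_appearance_times; infer_instance

def pvWitness_calculate_appearance_times : (List (String × List String)) :=
  [("a", ["x", "y", "x"]), ("b", [])]

def Spec_calculate_appearance_times (input_dict : List (String × List String)) (out : List (String × List (String × Int))) : Prop := out = calculate_appearance_times_alt input_dict
instance (input_dict : List (String × List String)) (out : List (String × List (String × Int))) : Decidable (Spec_calculate_appearance_times input_dict out) := by unfold Spec_calculate_appearance_times; infer_instance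

-- ===== CLAIM (what is proved, stated in full; the proofs are below) =====
def Claim_equal_calculate_appearance_times : Prop := ∀ (input_dict : List (String × List String)), Dom_calculate_appearance_times input_dict → Pre_calculate_appearance_times input_dict → Spec_calculate_appearance_times input_dict (calculate_appearance_times input_dict)

-- ===== LEMMAS AND PROOFS =====

-- PySem.Set.discard is List.filter in disguise.
theorem pv_discard_eq_filter (s : List String) (x : String) :
    PySem.Set.discard s x = s.filter (fun y => y ≠ x) := by
  simp only [PySem.Set.discard]
  exact List.filter_congr (fun y _ => by by_cases hxy : y = x <;> simp [hxy])

-- set(...) (first-occurrence dedup) commutes with List.filter.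
theorem pv_ofList_filter (q : String → Bool) (xs : List String) :
    PySem.Set.ofList (xs.filter q) = (PySem.Set.ofList xs).filter q := by
  induction xs with
  | nil => rfl
  | cons a t ih =>
    by_cases hqa : q a
    · rw [List.filter_cons_of_pos hqa, PySem.Set.ofList_cons, PySem.Set.ofList_cons,
        pv_discard_eq_filter, pv_discard_eq_filter, ih,
        List.filter_cons_of_pos hqa, List.filter_filter, List.filter_filter]
      congr 1
      exact List.filter_congr (fun y _ => Bool.and_comm _ _)
    · rw [List.filter_cons_of_neg hqa, ih, PySem.Set.ofList_cons, pv_discard_eq_filter,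
        List.filter_cons_of_neg hqa, List.filter_filter]
      exact (List.filter_congr (fun y _ => by
        by_cases hy : q y
        · simp only [hy, Bool.true_and, decide_eq_true_eq]
          intro hya; exact hqa (hya ▸ hy)
        · simp [hy])).symm

-- B's recursive tally equals the first-occurrence dedup paired with counts.
theorem pv_tally_eq (vs : List String) :
    pvTally vs = (PySem.List.dedup vs).map (fun v => (v, (vs.count v : Int))) := by
  induction hn : vs.length using Nat.strong_induction_on generalizing vs with
  | _ n ih =>
    cases vs with
    | nil => simp [pvTally, PySem.List.dedup_eq_ofList, PySem.Set.ofList_nil]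
    | cons h t =>
      rw [pvTally]
      have hdd : PySem.List.dedup (h :: t)
          = h :: PySem.List.dedup (t.filter (fun y => y ≠ h)) := by
        simp only [PySem.List.dedup_eq_ofList]
        rw [pv_ofList_filter, PySem.Set.ofList_cons, pv_discard_eq_filter]
      rw [hdd, List.map_cons]
      have hlen : (t.filter (fun y => y ≠ h)).length < n := by
        subst hn
        exact Nat.lt_of_le_of_lt (List.length_filter_le _ _) (Nat.lt_succ_self _)
      rw [ih _ hlen _ rfl]
      congr 1
      · simp [List.count_eq_countP]
        ring
      · apply List.map_congr_left
        intro v hv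
        have hvne : v ≠ h := by
          have hmem := PySem.Set.mem_ofList (xs := t.filter (fun y => y ≠ h)) (y := v)
          rw [PySem.List.dedup_eq_ofList] at hv
          have := List.of_mem_filter (hmem.mp hv)
          simpa using this
        have hcf : (t.filter (fun y => y ≠ h)).count v = t.count v :=
          List.count_filter (by simp [hvne])
        have hc : t.count v = (h :: t).count v := by
          simp [List.count_cons, Ne.symm hvne]
        rw [hcf, hc]

-- ===== VERDICT (by name: the statement is the Claim_ definition above) =====
theorem calculate_appearance_times_spec : Claim_equal_calculate_appearance_times := by
  intro input_dict _ hpre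
  unfold Spec_calculate_appearance_times calculate_appearance_times calculate_appearance_times_alt
  rw [PySem.Dict.items_foldl_insert_fresh input_dict
        (k := Prod.fst)
        (v := fun kv => ((kv.2.foldl (fun counts value => counts.insert value (counts.getD value 0 + 1))
            (PySem.Dict.empty : PySem.Dict String Int)).items))
        (d := PySem.Dict.empty)
        (by intro a _; exact PySem.Dict.contains_empty _) hpre]
  have hempty : (PySem.Dict.empty : PySem.Dict String (List (String × Int))).items = [] := rfl
  rw [hempty, List.nil_append]
  apply List.map_congr_left
  intro kv _
  rw [PySem.Dict.foldl_insert_getD_add_one_eq_counter, PySem.Dict.items_counter,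
      pv_tally_eq, PySem.List.dedup_eq_ofList]
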